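-- pv_equiv track=rewrite | github.com/luckscx/PyProj | homework/a3starter/squeal.py | proc_select
-- ===== SOURCE A (Python) =====
-- def proc_select(table,col_names):
--     """
--     (table,string)->table
--
--     keep only those columns that were listed after the select.
--     if select * then return table
--     """
--
--     if col_names == '*':
--         return table
--     else:
--         col_names = col_names.split(',')
--         result = {}
--         for key,item in table.items():
--             if key in col_names:
--                 result[key] = item
--         return result
-- ===== SOURCE B (Python) =====
-- def proc_select(table, col_names):
--     """
--     (table,string)->table
--
--     keep only those columns that were listed after the select.
--     if select * then return table
--     """
--     if col_names == '*':
--         return table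
--     pos = {k: i for i, k in enumerate(table)}
--     picked = {}
--     for c in col_names.split(','):
--         if c in pos:
--             picked[c] = table[c]
--     return dict(sorted(picked.items(), key=lambda kv: pos[kv[0]]))
-- ===== Notes on version B (the rewrite author's own statement) =====
-- stated objective: alternative
-- what changed: A scans every table row and tests its key against the split name list; B is driven by the requested names instead: it builds a key->position index of the table, looks each requested name up directly, and restores table order by sorting the picked items on the recorded positions.
import Mathlib
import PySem

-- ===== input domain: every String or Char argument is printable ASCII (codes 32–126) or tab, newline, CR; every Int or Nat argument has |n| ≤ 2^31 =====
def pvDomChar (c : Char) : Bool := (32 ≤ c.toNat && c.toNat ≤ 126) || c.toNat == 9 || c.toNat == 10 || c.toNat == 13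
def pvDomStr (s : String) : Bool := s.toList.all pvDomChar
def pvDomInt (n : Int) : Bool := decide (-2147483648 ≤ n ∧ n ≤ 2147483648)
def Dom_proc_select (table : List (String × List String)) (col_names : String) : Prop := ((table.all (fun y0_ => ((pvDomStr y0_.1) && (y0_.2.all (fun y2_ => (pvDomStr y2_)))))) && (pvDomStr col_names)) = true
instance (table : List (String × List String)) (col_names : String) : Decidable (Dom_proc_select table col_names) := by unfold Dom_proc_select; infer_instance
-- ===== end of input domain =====

-- B selects by iterating the requested column names with dict lookups and restores table
-- order by sorting the picked items on each key's original index (alternative decomposition).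


-- ===== PORT A =====
def proc_select (table : List (String × List String)) (col_names : String) : List (String × List String) :=
  if col_names == "*" then table
  else
    let names := (PySem.Str.split? col_names ",").getD []
    (table.foldl
      (fun (result : PySem.Dict String (List String)) kv =>
        if List.contains names kv.1 then result.insert kv.1 kv.2 else result)
      PySem.Dict.empty).items

-- ===== PORT B =====
-- `table[c]` is ported as getD with default []: the guard `pos.contains c` guarantees the
-- key is present (pos's keys are the table's keys), so the default is never used.
def proc_select_alt (table : List (String × List String)) (col_names : String) : List (String × List String) :=
  if col_names == "*" then table
  else
    let pos : PySem.Dict String Int :=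
      (PySem.List.enumerate (table.map Prod.fst) 0).foldl
        (fun d p => d.insert p.2 p.1) PySem.Dict.empty
    let tbl := PySem.Dict.ofList table
    let picked :=
      ((PySem.Str.split? col_names ",").getD []).foldl
        (fun (r : PySem.Dict String (List String)) c =>
          if pos.contains c then r.insert c (tbl.getD c []) else r)
        PySem.Dict.empty
    (PySem.Dict.ofList
      (PySem.List.sorted picked.items (fun kv => pos.getD kv.1 (-1)) false)).items

-- ===== PRECONDITION & SPEC =====
-- Pre_ requires the keys of the association list to be distinct: in Python `table` is a dict,
-- so duplicate keys cannot occur; lists with duplicate keys do not represent any Python input.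
def Pre_proc_select (table : List (String × List String)) (col_names : String) : Prop :=
  (table.map Prod.fst).Nodup
instance (table : List (String × List String)) (col_names : String) : Decidable (Pre_proc_select table col_names) := by unfold Pre_proc_select; infer_instance
def pvWitness_proc_select : (List (String × List String)) × String :=
  ([("a", ["1"]), ("b", ["2"])], "b,a")

def Spec_proc_select (table : List (String × List String)) (col_names : String) (out : List (String × List String)) : Prop := out = proc_select_alt table col_names
instance (table : List (String × List String)) (col_names : String) (out : List (String × List String)) : Decidable (Spec_proc_select table col_names out) := by unfold Spec_proc_select; infer_instance

-- ===== CLAIM (what is proved, stated in full; the proofs are below) =====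
def Claim_equal_proc_select : Prop := ∀ (table : List (String × List String)) (col_names : String), Dom_proc_select table col_names → Pre_proc_select table col_names → Spec_proc_select table col_names (proc_select table col_names)

-- ===== LEMMAS AND PROOFS =====

-- A's fold over fresh distinct keys appends exactly the selected pairs
theorem pv_foldA (names : List String) :
    ∀ (table : List (String × List String)) (d : PySem.Dict String (List String)),
      (table.map Prod.fst).Nodup →
      (∀ kv ∈ table, d.contains kv.1 = false) →
      (table.foldl
        (fun (result : PySem.Dict String (List String)) kv =>
          if List.contains names kv.1 then result.insert kv.1 kv.2 else result) d).items
        = d.items ++ table.filter (fun kv => List.contains names kv.1) := by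
  intro table
  induction table with
  | nil => intro d _ _; simp
  | cons kv rest ih =>
    intro d hnd hfresh
    obtain ⟨k, v⟩ := kv
    simp only [List.foldl_cons, List.filter_cons]
    by_cases hc : List.contains names k = true
    · rw [if_pos hc]
      have hdk : d.contains k = false := hfresh (k, v) (by simp)
      have hrest : ∀ kv ∈ rest, (d.insert k v).contains kv.1 = false := by
        intro kv2 hkv2
        rw [PySem.Dict.contains_insert]
        have hne : kv2.1 ≠ k := by
          have := hnd
          simp only [List.map_cons, List.nodup_cons] at this
          intro he
          exact this.1 (he ▸ List.mem_map_of_mem hkv2)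
        simp [hne, hfresh kv2 (List.mem_cons_of_mem _ hkv2)]
      rw [ih (d.insert k v) (by simpa using hnd.of_cons) hrest]
      rw [PySem.Dict.items_insert_of_not_contains d v hdk]
      have hkmem : k ∈ names := by simpa using hc
      simp [hkmem]
    · rw [if_neg hc]
      rw [ih d (by simpa using hnd.of_cons) (fun kv2 h2 => hfresh kv2 (List.mem_cons_of_mem _ h2))]
      have hkmem : k ∉ names := by simpa using hc
      simp [hkmem]

-- dict(table) has items = table when keys are distinct
theorem pv_ofList_items (table : List (String × List String))
    (hnd : (table.map Prod.fst).Nodup) :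
    (PySem.Dict.ofList table).items = table := by
  have h := PySem.Dict.items_foldl_insert_fresh (d := (PySem.Dict.empty : PySem.Dict String (List String)))
      (l := table) (k := Prod.fst) (v := Prod.snd) (by intro a _; simp) hnd
  simpa [PySem.Dict.ofList, PySem.Dict.update] using h

-- first match in an association list with distinct keys is the pair itself
theorem pv_find_nodup (l : List (String × List String)) (kv : String × List String)
    (hnd : (l.map Prod.fst).Nodup) (hm : kv ∈ l) :
    l.find? (fun p => p.1 == kv.1) = some kv := by
  induction l with
  | nil => cases hm
  | cons p t ih =>
    simp only [List.map_cons, List.nodup_cons] at hnd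
    rcases List.mem_cons.mp hm with he | ht
    · subst he; simp [List.find?_cons_of_pos]
    · have hne : p.1 ≠ kv.1 := by
        intro h; exact hnd.1 (h ▸ List.mem_map_of_mem ht)
      rw [List.find?_cons_of_neg (by simp [hne])]
      exact ih hnd.2 ht

theorem pv_getD_of_mem (table : List (String × List String)) (kv : String × List String)
    (hnd : (table.map Prod.fst).Nodup) (hm : kv ∈ table) :
    (PySem.Dict.ofList table).getD kv.1 [] = kv.2 := by
  simp [PySem.Dict.getD, PySem.Dict.get?, pv_ofList_items table hnd, pv_find_nodup table kv hnd hm]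

-- the position dict: items are the swapped enumerate pairs
theorem pv_pos_items (ks : List String) (hnd : ks.Nodup) :
    ((PySem.List.enumerate ks 0).foldl
      (fun (d : PySem.Dict String Int) p => d.insert p.2 p.1) PySem.Dict.empty).items
    = (PySem.List.enumerate ks 0).map (fun p => (p.2, p.1)) := by
  have h := PySem.Dict.items_foldl_insert_fresh
      (d := (PySem.Dict.empty : PySem.Dict String Int))
      (l := PySem.List.enumerate ks 0) (k := fun p => p.2) (v := fun p => p.1)
      (by intro a _; simp) (by rw [PySem.List.map_snd_enumerate]; exact hnd)
  simpa using h

-- lookup in the position dict returns the index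
theorem pv_pos_getD (ks : List String) (hnd : ks.Nodup) :
    ∀ (s : Int) (d : PySem.Dict String Int),
      d.items = (PySem.List.enumerate ks s).map (fun p => (p.2, p.1)) →
      ∀ (i : Nat) (h : i < ks.length) (dflt : Int), d.getD ks[i] dflt = s + i := by
  induction ks with
  | nil => intro s d _ i h; exact absurd h (by simp)
  | cons k t ih =>
    intro s d hd i h dflt
    rw [PySem.List.enumerate_cons] at hd
    match i with
    | 0 =>
      simp only [List.getElem_cons_zero]
      simp [PySem.Dict.getD, PySem.Dict.get?, hd]
    | Nat.succ j =>
      have hj : j < t.length := by simpa using h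
      simp only [List.getElem_cons_succ]
      have hjm : t[j] ∈ t := List.getElem_mem _
      have hne : k ≠ t[j] := by
        intro he; exact (List.nodup_cons.mp hnd).1 (he ▸ hjm)
      have htail := ih (List.nodup_cons.mp hnd).2 (s + 1)
          (PySem.Dict.mk ((PySem.List.enumerate t (s + 1)).map (fun p => (p.2, p.1)))) rfl
          j (by simpa using h) dflt
      have : d.getD t[j] dflt
          = (PySem.Dict.mk ((PySem.List.enumerate t (s + 1)).map (fun p => (p.2, p.1)))).getD t[j] dflt := by
        simp [PySem.Dict.getD, PySem.Dict.get?, hd, hne]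
      rw [this, htail]
      push_cast
      ring

-- membership in the position dict is membership among the keys
theorem pv_pos_contains (ks : List String) (s : Int) (d : PySem.Dict String Int)
    (hd : d.items = (PySem.List.enumerate ks s).map (fun p => (p.2, p.1))) (c : String) :
    d.contains c = true ↔ c ∈ ks := by
  rw [PySem.Dict.contains, hd]
  simp only [List.any_map, List.any_eq_true, Function.comp]
  constructor
  · rintro ⟨p, hp, he⟩
    have : p.2 = c := by simpa using he
    have : p.2 ∈ (PySem.List.enumerate ks s).map (fun q => q.2) := by
      exact List.mem_map_of_mem hp
    rwa [PySem.List.map_snd_enumerate, ‹p.2 = c›] at this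
  · intro hc
    have : c ∈ (PySem.List.enumerate ks s).map (fun q => q.2) := by
      rwa [PySem.List.map_snd_enumerate]
    rcases List.mem_map.mp this with ⟨p, hp, he⟩
    exact ⟨p, hp, by simp [he]⟩

-- inserting a key with its canonical value into a canonical dict adds it as a set element
theorem pv_insert_same (val : String → List String) (ks : List String)
    (d : PySem.Dict String (List String)) (_hnd : ks.Nodup)
    (hd : d.items = ks.map (fun c => (c, val c))) (c : String) :
    (d.insert c (val c)).items = (PySem.Set.add ks c).map (fun c => (c, val c)) := by
  by_cases hm : c ∈ ks
  · have hcont : d.contains c = true := by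
      rw [PySem.Dict.contains, hd]
      simp only [List.any_map, List.any_eq_true, Function.comp]
      exact ⟨c, hm, by simp⟩
    rw [PySem.Dict.insert, if_pos hcont, PySem.Set.add_of_mem hm]
    show (d.items.map _) = _
    rw [hd, List.map_map]
    apply List.map_congr_left
    intro a _
    by_cases he : a = c
    · subst he; simp [Function.comp]
    · simp [Function.comp, he]
  · have hcont : d.contains c = false := by
      rw [PySem.Dict.contains, hd, List.any_eq_false]
      intro q hq
      rcases List.mem_map.mp hq with ⟨a, ha, rfl⟩
      have hne : a ≠ c := fun he => hm (by rw [← he]; exact ha)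
      simpa using hne
    rw [PySem.Dict.items_insert_of_not_contains d (val c) hcont, hd,
        PySem.Set.add_of_not_mem hm]
    simp

-- B's picking loop over the requested names builds the canonical dict over the deduped hits
theorem pv_foldPick (p : String → Bool) (val : String → List String) :
    ∀ (names ks : List String) (d : PySem.Dict String (List String)), ks.Nodup →
      d.items = ks.map (fun c => (c, val c)) →
      (names.foldl (fun (r : PySem.Dict String (List String)) c =>
          if p c then r.insert c (val c) else r) d).items
        = (PySem.Set.update ks (names.filter p)).map (fun c => (c, val c)) := by
  intro names
  induction names with
  | nil => intro ks d _ hd; simpa [PySem.Set.update] using hd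
  | cons c t ih =>
    intro ks d hnd hd
    simp only [List.foldl_cons, List.filter_cons]
    by_cases hc : p c = true
    · rw [if_pos hc, if_pos hc]
      have hstep := pv_insert_same val ks d hnd hd c
      have hnd' : (PySem.Set.add ks c).Nodup := PySem.Set.nodup_add ks c hnd
      rw [ih (PySem.Set.add ks c) _ hnd' hstep]
      simp [PySem.Set.update]
    · rw [if_neg (by simpa using hc), if_neg (by simpa using hc)]
      exact ih ks d hnd hd

-- ===== VERDICT (by name: the statement is the Claim_ definition above) =====
theorem proc_select_spec : Claim_equal_proc_select := by
  intro table col_names _ hpre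
  unfold Spec_proc_select proc_select proc_select_alt
  by_cases hstar : (col_names == "*") = true
  · simp [hstar]
  · simp only [hstar, Bool.false_eq_true, if_false]
    set names := (PySem.Str.split? col_names ",").getD [] with hnames
    set keys := table.map Prod.fst with hkeys
    set pos : PySem.Dict String Int :=
      (PySem.List.enumerate keys 0).foldl
        (fun d p => d.insert p.2 p.1) PySem.Dict.empty with hpos
    set tbl := PySem.Dict.ofList table with htbl
    set val : String → List String := fun c => tbl.getD c [] with hval
    have hposItems : pos.items = (PySem.List.enumerate keys 0).map (fun p => (p.2, p.1)) :=
      pv_pos_items keys hpre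
    -- A's side: the filtered table
    rw [pv_foldA names table PySem.Dict.empty hpre (by intro kv _; simp)]
    set F := table.filter (fun kv => List.contains names kv.1) with hF
    have hFsub : F.Sublist table := List.filter_sublist
    have hFkeys : (F.map Prod.fst).Sublist keys := hFsub.map Prod.fst
    have hFnd : (F.map Prod.fst).Nodup := hpre.sublist hFkeys
    -- B's picked items
    have hpicked :
        (names.foldl (fun (r : PySem.Dict String (List String)) c =>
            if pos.contains c then r.insert c (val c) else r) PySem.Dict.empty).items
          = (PySem.Set.ofList (names.filter (fun c => pos.contains c))).map
              (fun c => (c, val c)) := by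
      rw [pv_foldPick (fun c => pos.contains c) val names [] PySem.Dict.empty
            List.nodup_nil (by simp [PySem.Dict.empty])]
      rfl
    -- key function values on table elements
    have hkeyIdx : ∀ (i : Nat) (h : i < table.length),
        pos.getD (table[i]).1 (-1) = (i : Int) := by
      intro i h
      have hk : (table[i]).1 = keys[i]'(by simpa [hkeys] using h) := by
        simp [hkeys]
      rw [hk, pv_pos_getD keys hpre 0 pos hposItems i (by simpa [hkeys] using h) (-1)]
      simp
    -- F is strictly increasing under the position key
    have hFpw : F.Pairwise (fun a b => pos.getD a.1 (-1) < pos.getD b.1 (-1)) := by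
      apply List.Pairwise.sublist hFsub
      rw [List.pairwise_iff_getElem]
      intro i j hi hj hij
      rw [hkeyIdx i hi, hkeyIdx j hj]
      exact_mod_cast hij
    -- each element of F is its own canonical pair
    have hFval : ∀ kv ∈ F, (kv.1, val kv.1) = kv := by
      intro kv hm
      have hmt : kv ∈ table := List.mem_of_mem_filter hm
      have := pv_getD_of_mem table kv hpre hmt
      simp only [hval, htbl]
      exact Prod.ext rfl this
    -- F as a map over its keys
    have hFmap : F = (F.map Prod.fst).map (fun c => (c, val c)) := by
      rw [List.map_map]
      symm
      calc F.map ((fun c => (c, val c)) ∘ Prod.fst)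
          = F.map id := List.map_congr_left (fun kv hm => hFval kv hm)
        _ = F := List.map_id F
    -- the picked key set is a permutation of F's keys
    have hSperm : (PySem.Set.ofList (names.filter (fun c => pos.contains c))).Perm
        (F.map Prod.fst) := by
      rw [List.perm_ext_iff_of_nodup (PySem.Set.nodup_ofList _) hFnd]
      intro c
      rw [PySem.Set.mem_ofList, List.mem_filter]
      constructor
      · rintro ⟨hcn, hcp⟩
        have hck : c ∈ keys := (pv_pos_contains keys 0 pos hposItems c).mp hcp
        rcases List.mem_map.mp (hkeys ▸ hck) with ⟨kv, hkv, he⟩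
        refine List.mem_map.mpr ⟨kv, List.mem_filter.mpr ⟨hkv, ?_⟩, he⟩
        rw [he]; simpa using hcn
      · intro hcF
        rcases List.mem_map.mp hcF with ⟨kv, hkv, he⟩
        rcases List.mem_filter.mp hkv with ⟨hmt, hq⟩
        constructor
        · rw [← he]; simpa using hq
        · refine (pv_pos_contains keys 0 pos hposItems c).mpr ?_
          rw [hkeys, ← he]; exact List.mem_map_of_mem hmt
    -- sorting the picked items by position yields exactly F
    have hsorted : PySem.List.sorted
        ((names.foldl (fun (r : PySem.Dict String (List String)) c =>
            if pos.contains c then r.insert c (val c) else r) PySem.Dict.empty).items)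
        (fun kv => pos.getD kv.1 (-1)) false = F := by
      apply PySem.List.sorted_eq_of_perm_of_pairwise_lt
      · rw [hpicked, hFmap]
        exact (List.Perm.map _ hSperm).symm
      · exact hFpw
    rw [hsorted, pv_ofList_items F hFnd]
    simp [PySem.Dict.empty]
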